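-- pv_equiv track=rewrite | github.com/zhongwangwei/OpenBench | openbench/util/Mod_ReportGenerator.py | _extract_groups_from_txt
-- ===== SOURCE A (Python) =====
-- from typing import Dict, List, Optional, Union, Any
--
-- def _extract_groups_from_txt(content: str) -> List[str]:
--     """Extract group names from txt file content"""
--     groups = []
--     # Look for lines that might contain group names
--     lines = content.split('\n')
--     for line in lines:
--         # Common patterns for group names in txt files
--         if 'IGBP_' in line or 'PFT_' in line or 'CZ_' in line:
--             # Extract the group name
--             parts = line.split()
--             for part in parts:
--                 if 'IGBP_' in part or 'PFT_' in part or 'CZ_' in part: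
--                     groups.append(part)
--     return list(set(groups))  # Return unique groups
-- ===== SOURCE B (Python) =====
-- from typing import List
--
-- def _extract_groups_from_txt(content: str) -> List[str]:
--     """Extract group names from txt file content (single flat pass over tokens)."""
--     seen = set()
--     # content.split() already splits at newlines too, so the per-line gate is redundant:
--     # every whitespace-separated token of the file is visited exactly once.
--     for token in content.split():
--         if 'IGBP_' in token or 'PFT_' in token or 'CZ_' in token:
--             seen.add(token)
--     return list(seen)
-- ===== Notes on version B (the rewrite author's own statement) =====
-- stated objective: simpler
-- what changed: Replaced the nested lines-then-parts scan (with its redundant per-line substring gate) by a single flat pass over content.split() tokens that adds matching tokens to a set.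
import Mathlib
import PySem

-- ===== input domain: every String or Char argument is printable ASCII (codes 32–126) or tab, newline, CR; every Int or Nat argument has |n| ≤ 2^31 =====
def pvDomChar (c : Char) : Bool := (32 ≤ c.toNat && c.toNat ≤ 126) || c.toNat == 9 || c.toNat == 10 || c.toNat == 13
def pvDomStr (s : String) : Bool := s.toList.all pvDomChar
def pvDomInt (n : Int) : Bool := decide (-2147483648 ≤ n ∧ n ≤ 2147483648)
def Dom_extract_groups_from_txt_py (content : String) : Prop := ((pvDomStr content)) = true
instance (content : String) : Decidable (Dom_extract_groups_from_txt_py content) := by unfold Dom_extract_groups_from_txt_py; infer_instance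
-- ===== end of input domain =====

-- B replaces A's nested lines→parts scan (with its redundant per-line gate) by one flat
-- pass over the whitespace-separated tokens of the whole content; objective: simpler.
-- Both programs end in list(set(...)): the RETURN value is a set of strings (compared as a set).

-- ===== PORT A =====
def extract_groups_from_txt_py (content : String) : List String :=
  let lines := (PySem.Str.split? content "\n").getD []
  let groups := lines.foldl (fun acc line =>
    if PySem.Str.isIn "IGBP_" line || PySem.Str.isIn "PFT_" line || PySem.Str.isIn "CZ_" line then
      (PySem.Str.split₀ line).foldl (fun acc2 part =>
        if PySem.Str.isIn "IGBP_" part || PySem.Str.isIn "PFT_" part || PySem.Str.isIn "CZ_" part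
        then acc2 ++ [part] else acc2) acc
    else acc) []
  PySem.Set.ofList groups

-- ===== PORT B =====
def extract_groups_from_txt_py_alt (content : String) : List String :=
  (PySem.Str.split₀ content).foldl (fun (seen : PySem.Set String) token =>
    if PySem.Str.isIn "IGBP_" token || PySem.Str.isIn "PFT_" token || PySem.Str.isIn "CZ_" token
    then PySem.Set.add seen token else seen) PySem.Set.empty

-- ===== PRECONDITION & SPEC =====
def Spec_extract_groups_from_txt_py (content : String) (out : List String) : Prop := out = extract_groups_from_txt_py_alt content
instance (content : String) (out : List String) : Decidable (Spec_extract_groups_from_txt_py content out) := by unfold Spec_extract_groups_from_txt_py; infer_instance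

-- ===== CLAIM (what is proved, stated in full; the proofs are below) =====
def Claim_equal_extract_groups_from_txt_py : Prop := ∀ (content : String), Dom_extract_groups_from_txt_py content → Spec_extract_groups_from_txt_py content (extract_groups_from_txt_py content)

-- ===== LEMMAS AND PROOFS =====

-- the token-keeping test, on the List Char side
def keepC (cs : List Char) : Bool :=
  PySem.Chars.isIn "IGBP_".toList cs || PySem.Chars.isIn "PFT_".toList cs || PySem.Chars.isIn "CZ_".toList cs

def keepS (s : String) : Bool :=
  PySem.Str.isIn "IGBP_" s || PySem.Str.isIn "PFT_" s || PySem.Str.isIn "CZ_" s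

theorem keepS_ofList (l : List Char) : keepS (String.ofList l) = keepC l := by
  simp [keepS, keepC, PySem.Str.isIn]

-- split₀.go: the accumulator is a prefix of the result
theorem split₀_go_acc (s : List Char) : ∀ cur acc,
    PySem.Chars.split₀.go s cur acc = acc.reverse ++ PySem.Chars.split₀.go s cur [] := by
  induction s with
  | nil =>
    intro cur acc
    simp only [PySem.Chars.split₀.go]
    split_ifs <;> simp
  | cons c rest ih =>
    intro cur acc
    simp only [PySem.Chars.split₀.go]
    split_ifs with h1 h2
    · exact ih [] acc
    · rw [ih [] (cur.reverse :: acc), ih [] [cur.reverse]]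
      simp
    · exact ih (c :: cur) acc

-- splitting the word scan at a newline
theorem split₀_go_newline (a : List Char) : ∀ (b cur : List Char),
    PySem.Chars.split₀.go (a ++ '\n' :: b) cur [] =
      PySem.Chars.split₀.go a cur [] ++ PySem.Chars.split₀ b := by
  induction a with
  | nil =>
    intro b cur
    simp only [List.nil_append, PySem.Chars.split₀.go, PySem.Chars.split₀]
    have hnl : PySem.Chars.isspace '\n' = true := by decide
    rw [hnl]
    simp only [if_true]
    split_ifs with h
    · simp
    · rw [split₀_go_acc b [] [cur.reverse]]
  | cons c rest ih =>
    intro b cur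
    simp only [List.cons_append, PySem.Chars.split₀.go]
    split_ifs with h1 h2
    · exact ih b []
    · rw [split₀_go_acc (rest ++ '\n' :: b) [] [cur.reverse],
          split₀_go_acc rest [] [cur.reverse], ih b []]
      simp
    · exact ih b (c :: cur)

theorem split₀_append_newline (a b : List Char) :
    PySem.Chars.split₀ (a ++ '\n' :: b) = PySem.Chars.split₀ a ++ PySem.Chars.split₀ b := by
  simpa [PySem.Chars.split₀] using split₀_go_newline a b []

-- a simple accumulator-style model of splitting at '\n'
def splitNL (cur : List Char) : List Char → List (List Char)
  | [] => [cur.reverse]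
  | c :: r => if c = '\n' then cur.reverse :: splitNL [] r else splitNL (c :: cur) r

theorem splitOn_go_eq_splitNL : ∀ (fuel : Nat) (l cur : List Char) (acc : List (List Char)), l.length ≤ fuel →
    PySem.Chars.splitOn.go ['\n'] fuel l cur acc = acc.reverse ++ splitNL cur l := by
  intro fuel
  induction fuel with
  | zero =>
    intro l cur acc hl
    have : l = [] := by cases l <;> simp_all
    subst this
    simp [PySem.Chars.splitOn.go, splitNL]
  | succ fuel ih =>
    intro l cur acc hl
    cases l with
    | nil => simp [PySem.Chars.splitOn.go, splitNL]
    | cons c rest =>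
      simp only [PySem.Chars.splitOn.go, List.isPrefixOf, List.length_cons] at *
      by_cases hc : c = '\n'
      · subst hc
        rw [if_pos (by simp)]
        simp only [List.length_nil, List.drop_succ_cons, List.drop_zero]
        rw [ih rest [] (cur.reverse :: acc) (by omega)]
        simp [splitNL]
      · rw [if_neg (by simp [Ne.symm hc])]
        rw [ih rest (c :: cur) acc (by omega)]
        simp [splitNL, hc]

theorem splitOn_eq_splitNL (cs : List Char) :
    PySem.Chars.splitOn cs ['\n'] = splitNL [] cs := by
  simpa using splitOn_go_eq_splitNL (cs.length + 1) cs [] [] (by omega)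

-- all whitespace tokens of the whole text = tokens of the '\n'-separated pieces, in order
theorem flatMap_splitNL (l : List Char) : ∀ cur,
    (splitNL cur l).flatMap PySem.Chars.split₀ = PySem.Chars.split₀ (cur.reverse ++ l) := by
  induction l with
  | nil => intro cur; simp [splitNL]
  | cons c r ih =>
    intro cur
    by_cases hc : c = '\n'
    · subst hc
      have h1 : splitNL cur ('\n' :: r) = cur.reverse :: splitNL [] r := by simp [splitNL]
      rw [h1, List.flatMap_cons, ih [], split₀_append_newline]
      simp
    · have h1 : splitNL cur (c :: r) = splitNL (c :: cur) r := by simp [splitNL, hc]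
      rw [h1, ih (c :: cur)]
      simp

theorem tokens_eq (cs : List Char) :
    (PySem.Chars.splitOn cs ['\n']).flatMap PySem.Chars.split₀ = PySem.Chars.split₀ cs := by
  rw [splitOn_eq_splitNL]
  simpa using flatMap_splitNL cs []

-- every word produced by split₀ is an infix of the input
theorem mem_split₀_go_infix (s : List Char) : ∀ cur acc (w : List Char),
    w ∈ PySem.Chars.split₀.go s cur acc → w ∈ acc ∨ w <:+: (cur.reverse ++ s) := by
  induction s with
  | nil =>
    intro cur acc w hw
    simp only [PySem.Chars.split₀.go] at hw
    split_ifs at hw with h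
    · exact Or.inl (by simpa using hw)
    · simp only [List.mem_reverse, List.mem_cons] at hw
      rcases hw with h1 | h2
      · exact Or.inr (by simp [h1])
      · exact Or.inl h2
  | cons c rest ih =>
    intro cur acc w hw
    simp only [PySem.Chars.split₀.go] at hw
    split_ifs at hw with h1 h2
    · rcases ih [] acc w hw with h | h
      · exact Or.inl h
      · exact Or.inr (h.trans (by simp; exact ⟨cur.reverse ++ [c], [], by simp⟩))
    · rcases ih [] (cur.reverse :: acc) w hw with h | h
      · rcases List.mem_cons.mp h with h' | h'
        · exact Or.inr ⟨[], c :: rest, by simp [h']⟩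
        · exact Or.inl h'
      · exact Or.inr (h.trans ⟨cur.reverse ++ [c], [], by simp⟩)
    · rcases ih (c :: cur) acc w hw with h | h
      · exact Or.inl h
      · exact Or.inr (by simpa using h)

theorem mem_split₀_infix {w cs : List Char} (hw : w ∈ PySem.Chars.split₀ cs) : w <:+: cs := by
  rcases mem_split₀_go_infix cs [] [] w hw with h | h
  · simp at h
  · simpa using h

-- isIn is monotone under infix, hence keepC is
theorem keepC_of_infix {w cs : List Char} (h : w <:+: cs) (hk : keepC w = true) : keepC cs = true := by
  simp only [keepC, Bool.or_eq_true, PySem.Chars.isIn_iff_infix] at hk ⊢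
  rcases hk with (hk | hk) | hk
  · exact Or.inl (Or.inl (hk.trans h))
  · exact Or.inl (Or.inr (hk.trans h))
  · exact Or.inr (hk.trans h)

-- if a line fails the gate, it has no kept tokens
theorem filter_keep_eq_nil {cs : List Char} (h : keepC cs = false) :
    (PySem.Chars.split₀ cs).filter keepC = [] := by
  rw [List.filter_eq_nil_iff]
  intro w hw hkw
  have := keepC_of_infix (mem_split₀_infix hw) hkw
  simp [this] at h

-- the kept tokens of one line, as Strings
def gLine (line : String) : List String :=
  ((PySem.Chars.split₀ line.toList).filter keepC).map String.ofList

-- A's loop body always contributes exactly the kept tokens of the line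
theorem body_eq (acc : List String) (line : String) :
    (if PySem.Str.isIn "IGBP_" line || PySem.Str.isIn "PFT_" line || PySem.Str.isIn "CZ_" line then
      (PySem.Str.split₀ line).foldl (fun acc2 part =>
        if PySem.Str.isIn "IGBP_" part || PySem.Str.isIn "PFT_" part || PySem.Str.isIn "CZ_" part
        then acc2 ++ [part] else acc2) acc
    else acc) = acc ++ gLine line := by
  have hsplit : PySem.Str.split₀ line = (PySem.Chars.split₀ line.toList).map String.ofList := rfl
  by_cases hg : keepC line.toList = true
  · rw [if_pos (show (PySem.Str.isIn "IGBP_" line || PySem.Str.isIn "PFT_" line || PySem.Str.isIn "CZ_" line) = true from hg)]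
    rw [PySem.List.foldl_append_if
      (fun part => PySem.Str.isIn "IGBP_" part || PySem.Str.isIn "PFT_" part || PySem.Str.isIn "CZ_" part)
      (fun x => x) (PySem.Str.split₀ line) acc]
    have hfun : ((fun part => PySem.Str.isIn "IGBP_" part || PySem.Str.isIn "PFT_" part || PySem.Str.isIn "CZ_" part) ∘ String.ofList) = keepC := by
      funext l; exact keepS_ofList l
    rw [hsplit, List.filter_map, hfun]
    simp [gLine]
  · rw [if_neg (show ¬ (PySem.Str.isIn "IGBP_" line || PySem.Str.isIn "PFT_" line || PySem.Str.isIn "CZ_" line) = true from hg)]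
    simp only [Bool.not_eq_true] at hg
    simp [gLine, filter_keep_eq_nil hg]

theorem A_eq (content : String) :
    extract_groups_from_txt_py content =
      PySem.Set.ofList (((PySem.Chars.split₀ content.toList).filter keepC).map String.ofList) := by
  unfold extract_groups_from_txt_py
  have hlines : (PySem.Str.split? content "\n").getD [] =
      (PySem.Chars.splitOn content.toList ['\n']).map String.ofList := by
    simp [PySem.Str.split?, PySem.Chars.split?]
  simp only [hlines]
  have hfold : ∀ (ls : List String) (acc : List String),
      ls.foldl (fun acc line =>
        if PySem.Str.isIn "IGBP_" line || PySem.Str.isIn "PFT_" line || PySem.Str.isIn "CZ_" line then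
          (PySem.Str.split₀ line).foldl (fun acc2 part =>
            if PySem.Str.isIn "IGBP_" part || PySem.Str.isIn "PFT_" part || PySem.Str.isIn "CZ_" part
            then acc2 ++ [part] else acc2) acc
        else acc) acc = acc ++ ls.flatMap gLine := by
    intro ls acc
    have : (fun (acc : List String) (line : String) =>
        if PySem.Str.isIn "IGBP_" line || PySem.Str.isIn "PFT_" line || PySem.Str.isIn "CZ_" line then
          (PySem.Str.split₀ line).foldl (fun acc2 part =>
            if PySem.Str.isIn "IGBP_" part || PySem.Str.isIn "PFT_" part || PySem.Str.isIn "CZ_" part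
            then acc2 ++ [part] else acc2) acc
        else acc) = fun acc line => acc ++ gLine line := by
      funext acc line
      exact body_eq acc line
    rw [this, PySem.List.foldl_append_eq_flatMap]
  rw [hfold]
  congr 1
  rw [List.nil_append, List.flatMap_map]
  have : (fun l => gLine (String.ofList l)) =
      fun l => ((PySem.Chars.split₀ l).filter keepC).map String.ofList := by
    funext l; simp [gLine]
  rw [this, ← tokens_eq content.toList]
  induction PySem.Chars.splitOn content.toList ['\n'] with
  | nil => simp
  | cons p ps ih => simp [List.flatMap_cons, List.filter_append, ih]

theorem B_eq (content : String) :
    extract_groups_from_txt_py_alt content =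
      PySem.Set.ofList (((PySem.Chars.split₀ content.toList).filter keepC).map String.ofList) := by
  unfold extract_groups_from_txt_py_alt
  have hfilter : ∀ (xs : List String) (s : PySem.Set String),
      xs.foldl (fun seen token =>
        if PySem.Str.isIn "IGBP_" token || PySem.Str.isIn "PFT_" token || PySem.Str.isIn "CZ_" token
        then PySem.Set.add seen token else seen) s = (xs.filter keepS).foldl PySem.Set.add s := by
    intro xs
    induction xs with
    | nil => intro s; simp
    | cons x xs ih =>
      intro s
      rw [List.foldl_cons, List.filter_cons]
      by_cases hx : keepS x = true
      · rw [if_pos (show (PySem.Str.isIn "IGBP_" x || PySem.Str.isIn "PFT_" x || PySem.Str.isIn "CZ_" x) = true from hx),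
            if_pos hx, List.foldl_cons, ih]
      · rw [if_neg (show ¬ (PySem.Str.isIn "IGBP_" x || PySem.Str.isIn "PFT_" x || PySem.Str.isIn "CZ_" x) = true from hx),
            if_neg hx, ih]
  rw [hfilter, PySem.Set.ofList_eq_foldl]
  have : PySem.Set.empty = ([] : List String) := rfl
  rw [this]
  congr 1
  have hsplit : PySem.Str.split₀ content = (PySem.Chars.split₀ content.toList).map String.ofList := rfl
  rw [hsplit, List.filter_map]
  have hfun : (keepS ∘ String.ofList) = keepC := by funext l; exact keepS_ofList l
  rw [hfun]

-- ===== VERDICT (by name: the statement is the Claim_ definition above) =====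
theorem extract_groups_from_txt_py_spec : Claim_equal_extract_groups_from_txt_py := by
  intro content _
  unfold Spec_extract_groups_from_txt_py
  rw [A_eq, B_eq]
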